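-- pv_equiv track=rewrite | github.com/chilleo/ALPHA | module/informativeSites.py | is_site_informative
-- ===== SOURCE A (Python) =====
-- from collections import defaultdict
--
-- def is_site_informative(site):
--     """
--     Determines if a site is informative or not
--     Input:
--     site --- a list of bases located at a site in the alignment
--     Output:
--     1 if a site is informative 0 if a site is uninformative
--     """
--
--     # Create a mapping of bases to the number of times they occur
--     base_to_counts = defaultdict(int)
--
--     # Iterate over each base in the list site
--     for base in site:
--
--         # Add one each time a base occurs
--         base_to_counts[base] += 1
--
--     # Create a list of counts in descending order
--     base_counts = sorted(base_to_counts.values(), reverse=True)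
--
--     if len(base_counts) >= 2:
--         # If two different bases occur at least twice the site is informative
--         if (base_counts[0] >= 2) and (base_counts[1] >= 2):
--             return 1
--
--         else:
--             return 0
--     else:
--         return 0
-- ===== SOURCE B (Python) =====
-- def is_site_informative(site):
--     """
--     Determines if a site is informative or not (1 if informative, else 0).
--     A site is informative exactly when a second distinct repeated base exists:
--     sweep the site once, remember the first base that occurs at least twice,
--     and return 1 the moment a different base also occurring at least twice
--     is seen. No count dictionary and no sorting are built.
--     """
--     first_rep = None
--     for base in site:
--         if site.count(base) >= 2 and base != first_rep:
--             if first_rep is None: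
--                 first_rep = base
--             else:
--                 return 1
--     return 0
-- ===== Notes on version B (the rewrite author's own statement) =====
-- stated objective: alternative
-- what changed: B drops A's count-dictionary and the sort of its values entirely: it sweeps the site once with list.count, remembers the first base occurring at least twice, and returns 1 as soon as a different repeated base appears (early exit), trading asymptotic cost for no auxiliary structures.
import Mathlib
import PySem

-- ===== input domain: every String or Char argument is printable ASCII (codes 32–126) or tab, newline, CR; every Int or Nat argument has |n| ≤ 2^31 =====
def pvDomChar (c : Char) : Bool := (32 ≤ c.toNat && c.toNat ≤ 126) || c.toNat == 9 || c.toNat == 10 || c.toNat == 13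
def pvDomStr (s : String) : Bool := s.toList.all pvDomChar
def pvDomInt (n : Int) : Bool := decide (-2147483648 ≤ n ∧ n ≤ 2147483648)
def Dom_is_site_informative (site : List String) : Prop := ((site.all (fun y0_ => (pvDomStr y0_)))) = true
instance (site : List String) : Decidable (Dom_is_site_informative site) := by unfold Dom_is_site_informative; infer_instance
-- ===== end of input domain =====

-- B drops A's count-dictionary and sort: one sweep with list.count remembering the
-- first repeated base, returning 1 at the second distinct repeated base (alternative).


-- ===== PORT A =====
def is_site_informative (site : List String) : Int :=
  -- base_to_counts = defaultdict(int); for base in site: base_to_counts[base] += 1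
  let base_to_counts : PySem.Dict String Int :=
    site.foldl (fun d base => d.modify base 0 (· + 1)) PySem.Dict.empty
  -- base_counts = sorted(base_to_counts.values(), reverse=True)
  let base_counts := PySem.List.sorted base_to_counts.values (fun x => x) true
  if 2 ≤ base_counts.length then
    if 2 ≤ PySem.List.pyGetD base_counts 0 0 ∧ 2 ≤ PySem.List.pyGetD base_counts 1 0 then 1
    else 0
  else 0

-- ===== PORT B =====
-- the 'for base in site' loop of Source B, with its early 'return 1'
def is_site_informative_altLoop (site : List String) (rest : List String)
    (first_rep : Option String) : Int :=
  match rest with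
  | [] => 0                       -- loop fell through: return 0
  | base :: t =>
      -- if site.count(base) >= 2 and base != first_rep:
      if 2 ≤ PySem.List.count site base ∧ some base ≠ first_rep then
        match first_rep with
        | none => is_site_informative_altLoop site t (some base)   -- first_rep = base
        | some _ => 1                                              -- return 1
      else is_site_informative_altLoop site t first_rep

def is_site_informative_alt (site : List String) : Int :=
  is_site_informative_altLoop site site none

-- ===== PRECONDITION & SPEC =====
def Spec_is_site_informative (site : List String) (out : Int) : Prop := out = is_site_informative_alt site
instance (site : List String) (out : Int) : Decidable (Spec_is_site_informative site out) := by unfold Spec_is_site_informative; infer_instance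

-- ===== CLAIM (what is proved, stated in full; the proofs are below) =====
def Claim_equal_is_site_informative : Prop := ∀ (site : List String), Dom_is_site_informative site → Spec_is_site_informative site (is_site_informative site)

-- ===== LEMMAS AND PROOFS =====

-- On a descending list, "the top two are ≥ 2" is exactly "at least two elements are ≥ 2".
theorem top_two_iff_countP (s : List Int) (h : s.Pairwise (fun a b => b ≤ a)) :
    ((2 ≤ s.length ∧ 2 ≤ PySem.List.pyGetD s 0 0 ∧ 2 ≤ PySem.List.pyGetD s 1 0) ↔
      2 ≤ s.countP (fun c => decide (2 ≤ c))) := by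
  match s with
  | [] => simp
  | [a] =>
      constructor
      · rintro ⟨h2, -⟩; simp at h2
      · intro hc
        have hle := List.countP_le_length (p := fun c => decide (2 ≤ c)) (l := [a])
        simp only [List.length_singleton] at hle
        omega
  | a :: b :: t =>
      have hab : b ≤ a := by
        rcases List.pairwise_cons.mp h with ⟨ha, -⟩
        exact ha b (by simp)
      have hbt : ∀ x ∈ t, x ≤ b := by
        rcases List.pairwise_cons.mp h with ⟨-, h2⟩
        exact (List.pairwise_cons.mp h2).1
      have hget0 : PySem.List.pyGetD (a :: b :: t) 0 0 = a := by simp [pysem]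
      have hget1 : PySem.List.pyGetD (a :: b :: t) 1 0 = b := by simp [pysem]
      rw [hget0, hget1]
      simp only [List.countP_cons]
      constructor
      · rintro ⟨-, h2a, h2b⟩
        simp only [h2a, h2b, decide_true, if_pos]
        omega
      · intro hc
        refine ⟨by simp, ?_⟩
        by_cases h2b : 2 ≤ b
        · exact ⟨le_trans h2b hab, h2b⟩
        · exfalso
          have ht0 : t.countP (fun c => decide (2 ≤ c)) = 0 := by
            rw [List.countP_eq_zero]
            intro x hx
            have := hbt x hx
            simp only [decide_eq_true_eq]
            omega
          have hb0 : (if decide (2 ≤ b) = true then (1 : Nat) else 0) = 0 := by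
            simp [h2b]
          rw [ht0, hb0] at hc
          have hle : (if decide (2 ≤ a) = true then (1 : Nat) else 0) ≤ 1 := by
            split_ifs <;> omega
          omega

-- On a nodup list, countP ≥ 2 ↔ two distinct members satisfy the predicate.
theorem two_le_countP_iff_nodup {α : Type} [DecidableEq α] (l : List α) (hnd : l.Nodup)
    (p : α → Bool) :
    2 ≤ l.countP p ↔ ∃ a ∈ l, ∃ b ∈ l, p a ∧ p b ∧ a ≠ b := by
  rw [List.countP_eq_length_filter]
  constructor
  · intro h2
    match hf : l.filter p with
    | [] => rw [hf] at h2; simp at h2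
    | [x] => rw [hf] at h2; simp at h2
    | x :: y :: t =>
        have hndf : (l.filter p).Nodup := hnd.filter p
        rw [hf] at hndf
        have hxy : x ≠ y := by
          rcases List.pairwise_cons.mp hndf with ⟨hx, -⟩
          exact hx y (by simp)
        have hxm : x ∈ l.filter p := by rw [hf]; simp
        have hym : y ∈ l.filter p := by rw [hf]; simp
        rcases List.mem_filter.mp hxm with ⟨hxl, hxp⟩
        rcases List.mem_filter.mp hym with ⟨hyl, hyp⟩
        exact ⟨x, hxl, y, hyl, hxp, hyp, hxy⟩
  · rintro ⟨a, ha, b, hb, hpa, hpb, hab⟩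
    have haf : a ∈ l.filter p := List.mem_filter.mpr ⟨ha, hpa⟩
    have hbf : b ∈ l.filter p := List.mem_filter.mpr ⟨hb, hpb⟩
    match hf : l.filter p with
    | [] => rw [hf] at haf; simp at haf
    | [x] =>
        rw [hf] at haf hbf
        simp at haf hbf
        exact absurd (haf.trans hbf.symm) hab
    | x :: y :: t => simp

-- Characterisation of B's loop with first_rep = some a.
theorem altLoop_some (site : List String) (rest : List String) (a : String) :
    is_site_informative_altLoop site rest (some a) =
      if ∃ b ∈ rest, 2 ≤ PySem.List.count site b ∧ b ≠ a then 1 else 0 := by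
  induction rest with
  | nil => simp [is_site_informative_altLoop]
  | cons b t ih =>
      unfold is_site_informative_altLoop
      by_cases hc : 2 ≤ PySem.List.count site b ∧ some b ≠ some a
      · rw [if_pos hc]
        have : ∃ x ∈ b :: t, 2 ≤ PySem.List.count site x ∧ x ≠ a :=
          ⟨b, by simp, hc.1, by simpa using hc.2⟩
        rw [if_pos this]
      · rw [if_neg hc, ih]
        refine if_congr ?_ rfl rfl
        constructor
        · rintro ⟨x, hx, hpx, hxa⟩; exact ⟨x, by simp [hx], hpx, hxa⟩
        · rintro ⟨x, hx, hpx, hxa⟩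
          rcases List.mem_cons.mp hx with rfl | hxt
          · exact absurd ⟨hpx, by simpa using hxa⟩ hc
          · exact ⟨x, hxt, hpx, hxa⟩

-- Characterisation of B's loop with first_rep = None.
theorem altLoop_none (site : List String) (rest : List String) :
    is_site_informative_altLoop site rest none =
      if ∃ b ∈ rest, ∃ c ∈ rest, 2 ≤ PySem.List.count site b ∧
          2 ≤ PySem.List.count site c ∧ b ≠ c then 1 else 0 := by
  induction rest with
  | nil => simp [is_site_informative_altLoop]
  | cons b t ih =>
      unfold is_site_informative_altLoop
      by_cases hpb : 2 ≤ PySem.List.count site b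
      · rw [if_pos ⟨hpb, by simp⟩, altLoop_some]
        refine if_congr ?_ rfl rfl
        constructor
        · rintro ⟨c, hc, hpc, hcb⟩
          exact ⟨b, by simp, c, by simp [hc], hpb, hpc, fun h => hcb h.symm⟩
        · rintro ⟨x, hx, y, hy, hpx, hpy, hxy⟩
          by_cases hxb : x = b
          · subst hxb
            have hyt : y ∈ t := by
              rcases List.mem_cons.mp hy with rfl | h
              · exact absurd rfl hxy
              · exact h
            exact ⟨y, hyt, hpy, fun h => hxy h.symm⟩
          · have hxt : x ∈ t := by
              rcases List.mem_cons.mp hx with rfl | h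
              · exact absurd rfl hxb
              · exact h
            exact ⟨x, hxt, hpx, hxb⟩
      · rw [if_neg (fun h => hpb h.1), ih]
        refine if_congr ?_ rfl rfl
        constructor
        · rintro ⟨x, hx, y, hy, hpx, hpy, hxy⟩
          exact ⟨x, by simp [hx], y, by simp [hy], hpx, hpy, hxy⟩
        · rintro ⟨x, hx, y, hy, hpx, hpy, hxy⟩
          have hxt : x ∈ t := by
            rcases List.mem_cons.mp hx with rfl | h
            · exact absurd hpx hpb
            · exact h
          have hyt : y ∈ t := by
            rcases List.mem_cons.mp hy with rfl | h
            · exact absurd hpy hpb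
            · exact h
          exact ⟨x, hxt, y, hyt, hpx, hpy, hxy⟩

theorem main_eq (site : List String) :
    is_site_informative site = is_site_informative_alt site := by
  unfold is_site_informative is_site_informative_alt
  dsimp only
  rw [← PySem.Dict.counter_eq_foldl site, altLoop_none]
  have hpair := PySem.List.sorted_pairwise_rev (PySem.Dict.counter site).values (fun x : Int => x)
  have hiff := top_two_iff_countP _ hpair
  rw [(PySem.List.sorted_perm (PySem.Dict.counter site).values (fun x : Int => x) true).countP_eq]
    at hiff
  -- values of Counter(site): one Int count per distinct base
  have hvals : (PySem.Dict.counter site).values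
      = (PySem.Set.ofList site).map (fun k => (site.count k : Int)) := by
    have h := PySem.Dict.items_counter (xs := site)
    calc (PySem.Dict.counter site).values
        = (PySem.Dict.counter site).items.map (·.2) := rfl
      _ = _ := by rw [h, List.map_map]; rfl
  have hvalsiff : (2 ≤ List.countP (fun c : Int => decide (2 ≤ c)) (PySem.Dict.counter site).values)
      ↔ ∃ b ∈ site, ∃ c ∈ site, 2 ≤ PySem.List.count site b ∧
          2 ≤ PySem.List.count site c ∧ b ≠ c := by
    rw [hvals, List.countP_map]
    have hcnt : ((PySem.Set.ofList site).countP
          ((fun c : Int => decide (2 ≤ c)) ∘ fun k => (site.count k : Int)))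
        = (PySem.Set.ofList site).countP (fun k => decide (2 ≤ PySem.List.count site k)) := by
      apply List.countP_congr
      intro k _
      simp [PySem.List.count_eq]
    rw [hcnt, two_le_countP_iff_nodup _ (PySem.Set.nodup_ofList site)]
    have hmem : ∀ x : String, x ∈ PySem.Set.ofList site ↔ x ∈ site :=
      fun x => PySem.Set.mem_ofList site x
    constructor
    · rintro ⟨a, ha, b, hb, hpa, hpb, hab⟩
      exact ⟨a, (hmem a).mp ha, b, (hmem b).mp hb, by simpa using hpa, by simpa using hpb, hab⟩
    · rintro ⟨a, ha, b, hb, hpa, hpb, hab⟩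
      exact ⟨a, (hmem a).mpr ha, b, (hmem b).mpr hb, by simpa using hpa, by simpa using hpb, hab⟩
  have hkey := hiff.trans hvalsiff
  split_ifs with h1 h2 h3 h4
  · rfl
  · exact absurd (hkey.mp ⟨h1, h2⟩) h3
  · exact absurd ⟨(hkey.mpr h4).2.1, (hkey.mpr h4).2.2⟩ h2
  · rfl
  · exact absurd (hkey.mpr ‹_›).1 h1
  · rfl

-- ===== VERDICT (by name: the statement is the Claim_ definition above) =====
theorem is_site_informative_spec : Claim_equal_is_site_informative := by
  intro site _
  unfold Spec_is_site_informative
  exact main_eq site
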